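-- pv_equiv track=rewrite | github.com/RedLexa/IST | Projeto final.py | corrigir_palavra
-- ===== SOURCE A (Python) =====
-- def corrigir_palavra(new):
--     """
--       corrigir_palavra: cad.caracteres -> cad. caracteres
--     Esta funcao corrige as palvras eliminando os surtos
--     :param new: Entrada com surtos
--     :return: Saida sem surtos
--     MBL
--     """
--     new = list(new)
--     count = 1
--     while count != 0:
--         count = 0
--         for i in range(len(new)):
--             if i < len(new) - 1 and abs(ord(new[i])-ord((new[i + 1]))) == 32 : #32 e a distancia entre uma letra maiscula
--                 del new[i:i+2]                                                 #e minuscula em ASCII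
--                 count += 1
--         cad_caracteres_final = "".join(new)
--     return (cad_caracteres_final)
-- ===== SOURCE B (Python) =====
-- def corrigir_palavra(new):
--     stack = []
--     for c in new:
--         if stack and abs(ord(stack[-1]) - ord(c)) == 32:
--             stack.pop()
--         else:
--             stack.append(c)
--     return "".join(stack)
-- ===== Notes on version B (the rewrite author's own statement) =====
-- stated objective: alternative
-- what changed: A's repeated in-place sweeps (stale-range for loop with del new[i:i+2], re-run until a sweep deletes nothing) are replaced by a single left-to-right stack pass that pops when the incoming char and the stack top are 32 apart; Pre_ excludes strings in which some character occurs together with both of its ASCII-distance-32 neighbours, because there the removal order is ambiguous (the rewriting is non-confluent) and A's result is an accident of its stale-index sweep.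
-- outside the precondition, e.g. on corrigir_palavra(' @ @`'): A returns ' ', B returns '`'; on corrigir_palavra('!Aa!'): A returns 'a!', B returns 'a!'
import Mathlib
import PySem

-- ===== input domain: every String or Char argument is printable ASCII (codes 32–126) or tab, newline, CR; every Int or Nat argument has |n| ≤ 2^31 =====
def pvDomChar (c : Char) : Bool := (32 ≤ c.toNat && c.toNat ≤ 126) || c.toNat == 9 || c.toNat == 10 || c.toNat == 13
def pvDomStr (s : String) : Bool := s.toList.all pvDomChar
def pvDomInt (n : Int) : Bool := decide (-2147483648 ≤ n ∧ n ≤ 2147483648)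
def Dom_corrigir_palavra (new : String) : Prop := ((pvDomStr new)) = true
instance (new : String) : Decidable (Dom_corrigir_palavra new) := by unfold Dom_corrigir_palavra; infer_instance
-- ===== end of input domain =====

-- B replaces A's repeated in-place sweeps by a single left-to-right stack pass; Pre_ excludes
-- the strings on which the pair-removal order is ambiguous (see comment above Pre_).

-- ===== PORT A =====
-- abs(ord(x) - ord(y)) == 32
def pvSurto (a b : Char) : Bool := ((a.toNat : Int) - (b.toNat : Int)).natAbs == 32

-- one execution of "for i in range(len(new)): …" ; k = remaining iterations, i = loop index,
-- l = the mutable list, c = count. `del new[i:i+2]` = take i ++ drop (i+2).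
def passA : Nat → Nat → List Char → Nat → List Char × Nat
  | 0, _, l, c => (l, c)
  | k + 1, i, l, c =>
    -- the guard keeps both indices in range, so getD is exact for new[i], new[i+1]
    if i < l.length - 1 then
      if pvSurto (l.getD i default) (l.getD (i + 1) default) then
        passA k (i + 1) (l.take i ++ l.drop (i + 2)) (c + 1)
      else
        passA k (i + 1) l c
    else
      passA k (i + 1) l c

-- the "while count != 0" loop. Python's loop terminates because every pass that still
-- deletes removes at least 2 characters; len(new)+1 passes therefore always reach the
-- fixpoint, so the fuel guard below never fires on the real computation.
def corrigir_palavra_core (fuel : Nat) (l : List Char) : List Char :=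
  match fuel with
  | 0 => l
  | fuel + 1 =>
    let r := passA l.length 0 l 0
    if r.2 ≠ 0 then corrigir_palavra_core fuel r.1 else r.1

def corrigir_palavra (new : String) : String :=
  String.mk (corrigir_palavra_core (new.toList.length + 1) new.toList)

-- ===== PORT B =====
-- Source B's loop body: pop when the stack top and the incoming char are 32 apart, else push.
-- The stack is kept top-first, so "".join(stack) is the reverse of the fold's state.
def pvStackStep (st : List Char) (c : Char) : List Char :=
  match st with
  | [] => [c]
  | t :: rest => if pvSurto t c then rest else c :: t :: rest

def corrigir_palavra_alt (new : String) : String :=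
  String.mk (new.toList.foldl pvStackStep []).reverse

-- ===== PRECONDITION & SPEC =====
-- Pre_ excludes strings in which some character occurs together with BOTH of its
-- ASCII-distance-32 neighbours (e.g. ' ', '@' and '`' all present): there the removal of
-- adjacent distance-32 pairs is order-dependent (non-confluent), no particular removal
-- order is specified, and A's value is an accident of its stale-index sweep.
-- "no char of the string has two distinct distance-32 partners in the string", as a Bool check
def pvUniqB (l : List Char) : Bool :=
  l.all fun a => l.all fun b => l.all fun c =>
    !((a.toNat + 32 == b.toNat || b.toNat + 32 == a.toNat) &&
      (a.toNat + 32 == c.toNat || c.toNat + 32 == a.toNat) && b != c)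

def Pre_corrigir_palavra (new : String) : Prop := pvUniqB new.toList = true
instance (new : String) : Decidable (Pre_corrigir_palavra new) := by
  unfold Pre_corrigir_palavra; infer_instance

def pvWitness_corrigir_palavra : String := "aA"

def Spec_corrigir_palavra (new : String) (out : String) : Prop := out = corrigir_palavra_alt new
instance (new : String) (out : String) : Decidable (Spec_corrigir_palavra new out) := by unfold Spec_corrigir_palavra; infer_instance

-- ===== CLAIM (what is proved, stated in full; the proofs are below) =====
def Claim_equal_corrigir_palavra : Prop := ∀ (new : String), Dom_corrigir_palavra new → Pre_corrigir_palavra new → Spec_corrigir_palavra new (corrigir_palavra new)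

-- ===== LEMMAS AND PROOFS =====

-- pvSurto is symmetric
theorem pvSurto_comm (a b : Char) : pvSurto a b = pvSurto b a := by
  unfold pvSurto
  have h : ((a.toNat : Int) - (b.toNat : Int)).natAbs
      = ((b.toNat : Int) - (a.toNat : Int)).natAbs := by omega
  rw [h]

-- the unique-partner property Pre_ gives, in pvSurto form
def pvUniq (S : List Char) : Prop :=
  ∀ a ∈ S, ∀ b ∈ S, ∀ c ∈ S, pvSurto a b = true → pvSurto a c = true → b = c

-- stacks arising during the fold are pair-free
def pvOK (st : List Char) : Prop := List.IsChain (fun x y => pvSurto x y = false) st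

-- FUNCTIONAL FORM OF A's PASS (proof helper, not a port): scan; on a match drop the pair,
-- emit the following char as-is, continue after it — this is what the stale-range loop does.
def passB : List Char → List Char × Bool
  | [] => ([], false)
  | [a] => ([a], false)
  | a :: b :: rest =>
    if pvSurto a b then
      match rest with
      | [] => ([], true)
      | c :: rest' => (c :: (passB rest').1, true)
    else
      (a :: (passB (b :: rest)).1, (passB (b :: rest)).2)

theorem passB_len_le (l : List Char) : (passB l).1.length ≤ l.length := by
  fun_induction passB l <;> simp_all <;> omega

theorem passB_snd_lt (l : List Char) (h : (passB l).2 = true) :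
    (passB l).1.length < l.length := by
  fun_induction passB l <;> simp_all <;> try omega
  next a b rest rest' hs => have := passB_len_le rest'; omega

theorem passB_subset (l : List Char) : ∀ x ∈ (passB l).1, x ∈ l := by
  fun_induction passB l with
  | case1 => intro x hx; exact hx
  | case2 a => intro x hx; exact hx
  | case3 a b hs => intro x hx; simp [passB] at hx
  | case4 a b hs c rest' ih =>
    intro x hx
    rcases List.mem_cons.mp hx with h | h
    · simp [h]
    · have := ih x h; simp_all
  | case5 a b rest hs ih =>
    intro x hx
    rcases List.mem_cons.mp hx with h | h
    · simp [h]
    · exact List.mem_cons_of_mem a (ih x h)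

-- number of deletions a pass performs (mirrors passB's recursion)
def cntB : List Char → Nat
  | [] => 0
  | [_] => 0
  | a :: b :: rest =>
    if pvSurto a b then
      (match rest with
       | [] => 0
       | _ :: rest' => cntB rest') + 1
    else
      cntB (b :: rest)

theorem passB_snd_eq (l : List Char) : (passB l).2 = decide (cntB l ≠ 0) := by
  fun_induction passB l <;> simp_all [cntB]
  next a b rest h ih =>
    have hc : cntB (a :: b :: rest) = cntB (b :: rest) := by
      rw [cntB.eq_def]; simp [h]
    rw [hc]

-- a pass that deletes nothing is the identity, and its input has no adjacent pair
theorem cntB_zero_chain (l : List Char) (h : cntB l = 0) :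
    List.IsChain (fun x y => pvSurto x y = false) l := by
  fun_induction cntB l with
  | case1 => simp
  | case2 a => simp
  | case3 a b rest hs ih => omega
  | case4 a b rest hs ih =>
    have hf : pvSurto a b = false := by simpa using hs
    have h' : cntB (b :: rest) = 0 := by simpa [hf] using h
    exact List.isChain_cons_cons.mpr ⟨hf, ih h'⟩

theorem passB_of_cntB_zero (l : List Char) (h : cntB l = 0) : (passB l).1 = l := by
  fun_induction cntB l with
  | case1 => rfl
  | case2 a => rfl
  | case3 a b rest hs ih => omega
  | case4 a b rest hs ih =>
    have hf : pvSurto a b = false := by simpa using hs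
    have h' : cntB (b :: rest) = 0 := by simpa [hf] using h
    rw [passB.eq_def]
    simp [hf, ih h']

-- MAIN INVARIANT for A's pass: one pass of the stale-range loop from index i equals
-- prefix + passB of the suffix (copied verbatim from the pass semantics analysis)
theorem passA_eq (k i : Nat) (l : List Char) (c : Nat) (hk : l.length ≤ i + k) :
    passA k i l c = (l.take i ++ (passB (l.drop i)).1, c + cntB (l.drop i)) := by
  induction k generalizing i l c with
  | zero =>
    have hle : l.length ≤ i := by omega
    simp [passA, List.drop_eq_nil_of_le hle, passB, cntB, List.take_of_length_le hle]
  | succ k ih =>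
    simp only [passA]
    split
    · rename_i h
      have hi1 : i + 1 < l.length := by omega
      have hdrop : l.drop i = l[i] :: l[i+1] :: l.drop (i+2) := by
        rw [List.drop_eq_getElem_cons (by omega), List.drop_eq_getElem_cons hi1]
      have htakei : (l.take i).length = i := by simp; omega
      have hgi : l.getD i default = l[i] := by
        rw [List.getD_eq_getElem?_getD, List.getElem?_eq_getElem (by omega : i < l.length)]; rfl
      have hgi1 : l.getD (i + 1) default = l[i + 1] := by
        rw [List.getD_eq_getElem?_getD, List.getElem?_eq_getElem hi1]; rfl
      rw [hgi, hgi1]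
      split
      · rename_i hs
        have hlen' : (l.take i ++ l.drop (i+2)).length ≤ (i+1) + k := by
          simp only [List.length_append, List.length_take, List.length_drop]; omega
        rw [ih (i+1) _ (c+1) hlen']
        have hdrop1 : (l.take i ++ l.drop (i+2)).drop (i+1) = (l.drop (i+2)).drop 1 := by
          have hidx : i + 1 = (l.take i).length + 1 := by rw [htakei]
          rw [hidx, List.drop_length_add_append]
        have htake1 : (l.take i ++ l.drop (i+2)).take (i+1) = l.take i ++ (l.drop (i+2)).take 1 := by
          have hidx : i + 1 = (l.take i).length + 1 := by rw [htakei]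
          rw [hidx, List.take_length_add_append]
        rw [hdrop1, htake1, hdrop]
        cases hrest : l.drop (i+2) with
        | nil => simp [passB, cntB, hs]
        | cons c0 rest' => simp [passB, cntB, hs]; omega
      · rename_i hs
        rw [ih (i+1) l c (by omega)]
        have hdrop1 : l.drop (i+1) = l[i+1] :: l.drop (i+2) := List.drop_eq_getElem_cons hi1
        have htake1 : l.take (i+1) = l.take i ++ [l[i]] := by
          rw [List.take_succ, List.getElem?_eq_getElem (by omega : i < l.length)]
          rfl
        have hp : (passB (l[i] :: l[i+1] :: l.drop (i+2))).1
            = l[i] :: (passB (l[i+1] :: l.drop (i+2))).1 := by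
          rw [passB.eq_def]; simp [hs]
        have hc : cntB (l[i] :: l[i+1] :: l.drop (i+2)) = cntB (l[i+1] :: l.drop (i+2)) := by
          rw [cntB.eq_def]; simp [hs]
        refine Prod.ext ?_ ?_
        · rw [hdrop1, htake1, hdrop, hp, List.append_assoc, List.singleton_append]
        · rw [hdrop1, hdrop, hc]
    · rename_i h
      rw [ih (i+1) l c (by omega)]
      by_cases hle : l.length ≤ i
      · have hle1 : l.length ≤ i + 1 := by omega
        rw [List.drop_eq_nil_of_le hle, List.drop_eq_nil_of_le hle1,
          List.take_of_length_le hle, List.take_of_length_le hle1]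
      · have hi : i < l.length := by omega
        have hle1 : l.length ≤ i + 1 := by omega
        have h1 : l.drop i = [l[i]] := by
          rw [List.drop_eq_getElem_cons hi]
          congr 1
          exact List.drop_eq_nil_of_le hle1
        have h3 : l.take (i+1) = l.take i ++ [l[i]] := by
          rw [List.take_succ, List.getElem?_eq_getElem hi]
          rfl
        rw [List.drop_eq_nil_of_le hle1, h1, h3]
        simp [passB, cntB]

-- ===== stack-side lemmas =====

theorem step_ok (st : List Char) (c : Char) (hOK : pvOK st) : pvOK (pvStackStep st c) := by
  cases st with
  | nil => simp [pvStackStep, pvOK]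
  | cons t rest =>
    simp only [pvStackStep]
    split
    · exact hOK.tail
    · rename_i hf
      refine List.isChain_cons_cons.mpr ⟨?_, hOK⟩
      rw [pvSurto_comm]; simpa using hf

theorem step_sub (S : List Char) (st : List Char) (c : Char)
    (hst : ∀ x ∈ st, x ∈ S) (hc : c ∈ S) : ∀ x ∈ pvStackStep st c, x ∈ S := by
  cases st with
  | nil => simpa [pvStackStep]
  | cons t rest =>
    simp only [pvStackStep]
    split
    · intro x hx; exact hst x (List.mem_cons_of_mem _ hx)
    · intro x hx
      rcases List.mem_cons.mp hx with h | h
      · exact h ▸ hc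
      · exact hst x h

-- deleting an adjacent matching pair does not change the stack fold (under pvUniq)
theorem del_red (S : List Char) (hS : pvUniq S) (st : List Char) (a b : Char) (v : List Char)
    (hstS : ∀ x ∈ st, x ∈ S) (hstOK : pvOK st) (ha : a ∈ S) (hb : b ∈ S)
    (hab : pvSurto a b = true) :
    List.foldl pvStackStep st (a :: b :: v) = List.foldl pvStackStep st v := by
  have key : pvStackStep (pvStackStep st a) b = st := by
    cases st with
    | nil => simp [pvStackStep, hab]
    | cons t rest =>
      simp only [pvStackStep]
      by_cases hta : pvSurto t a = true
      · simp only [hta, if_true]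
        have htb : t = b := by
          refine hS a ha t (hstS t (by simp)) b hb ?_ hab
          rw [pvSurto_comm]; exact hta
        cases rest with
        | nil => simp [pvStackStep, htb]
        | cons t' r' =>
          have ht't : pvSurto t t' = false := (List.isChain_cons_cons.mp hstOK).1
          have : pvSurto t' b = false := by
            rw [pvSurto_comm, ← htb]; exact ht't
          simp [pvStackStep, this, htb]
      · simp only [Bool.not_eq_true] at hta
        simp [hta, pvStackStep, hab]
  simp only [List.foldl_cons, key]

-- A's pass does not change the stack fold either
theorem pass_red (S : List Char) (hS : pvUniq S) :
    ∀ l st, (∀ x ∈ l, x ∈ S) → (∀ x ∈ st, x ∈ S) → pvOK st →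
      List.foldl pvStackStep st (passB l).1 = List.foldl pvStackStep st l := by
  intro l
  fun_induction passB l with
  | case1 => intro st _ _ _; rfl
  | case2 a => intro st _ _ _; rfl
  | case3 a b hs =>
    intro st hl hst hOK
    have ha : a ∈ S := hl a (by simp)
    have hb : b ∈ S := hl b (by simp)
    simpa using (del_red S hS st a b [] hst hOK ha hb hs).symm
  | case4 a b hs c rest' ih =>
    intro st hl hst hOK
    have ha : a ∈ S := hl a (by simp)
    have hb : b ∈ S := hl b (by simp)
    have hc : c ∈ S := hl c (by simp)
    have hrest' : ∀ x ∈ rest', x ∈ S := fun x hx => hl x (by simp [hx])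
    simp only [List.foldl_cons]
    rw [ih (pvStackStep st c) hrest' (step_sub S st c hst hc) (step_ok st c hOK)]
    have := del_red S hS st a b (c :: rest') hst hOK ha hb hs
    simpa using this.symm
  | case5 a b rest hs ih =>
    intro st hl hst hOK
    have ha : a ∈ S := hl a (by simp)
    have htail : ∀ x ∈ b :: rest, x ∈ S := fun x hx => hl x (List.mem_cons_of_mem a hx)
    simp only [List.foldl_cons]
    exact ih (pvStackStep st a) htail (step_sub S st a hst ha) (step_ok st a hOK)

-- folding a pair-free list onto a compatible stack just pushes it
def headsOK : List Char → List Char → Prop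
  | t :: _, c :: _ => pvSurto t c = false
  | _, _ => True

theorem pf_red : ∀ (l st : List Char),
    List.IsChain (fun x y => pvSurto x y = false) l → headsOK st l →
    List.foldl pvStackStep st l = l.reverse ++ st := by
  intro l
  induction l with
  | nil => intro st _ _; simp
  | cons c l' ih =>
    intro st hch hh
    have hstep : pvStackStep st c = c :: st := by
      cases st with
      | nil => rfl
      | cons t rest =>
        have : pvSurto t c = false := hh
        simp [pvStackStep, this]
    have hch' := hch.tail
    have hh' : headsOK (c :: st) l' := by
      cases l' with
      | nil => trivial
      | cons d _ => exact (List.isChain_cons_cons.mp hch).1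
    simp only [List.foldl_cons, hstep, ih (c :: st) hch' hh']
    simp

-- the while loop reaches a deletion-free fixpoint whose stack fold equals the input's
theorem core_red (S : List Char) (hS : pvUniq S) :
    ∀ fuel l, l.length < fuel → (∀ x ∈ l, x ∈ S) →
      cntB (corrigir_palavra_core fuel l) = 0 ∧
      List.foldl pvStackStep [] (corrigir_palavra_core fuel l) =
        List.foldl pvStackStep [] l := by
  intro fuel
  induction fuel with
  | zero => intro l h _; omega
  | succ fuel ih =>
    intro l hlen hl
    simp only [corrigir_palavra_core]
    have hA := passA_eq l.length 0 l 0 (by omega)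
    simp only [List.take_zero, List.drop_zero, List.nil_append, Nat.zero_add] at hA
    simp only [hA]
    by_cases hc : cntB l = 0
    · simp only [hc, ne_eq, not_true_eq_false, if_false]
      rw [passB_of_cntB_zero l hc]
      exact ⟨hc, rfl⟩
    · simp only [hc, ne_eq, not_false_eq_true, if_true]
      have hsnd : (passB l).2 = true := by rw [passB_snd_eq]; simpa using hc
      have hlt := passB_snd_lt l hsnd
      have hsub : ∀ x ∈ (passB l).1, x ∈ S := fun x hx => hl x (passB_subset l x hx)
      obtain ⟨h1, h2⟩ := ih (passB l).1 (by omega) hsub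
      refine ⟨h1, ?_⟩
      rw [h2]
      exact pass_red S hS l [] hl (by simp) (by simp [pvOK])

theorem pvUniqB_to_pvUniq (l : List Char) (h : pvUniqB l = true) : pvUniq l := by
  intro a ha b hb c hc hab hac
  have hab' : a.toNat + 32 = b.toNat ∨ b.toNat + 32 = a.toNat := by
    simp only [pvSurto, beq_iff_eq] at hab; omega
  have hac' : a.toNat + 32 = c.toNat ∨ c.toNat + 32 = a.toNat := by
    simp only [pvSurto, beq_iff_eq] at hac; omega
  simp only [pvUniqB, List.all_eq_true] at h
  have hw := h a ha b hb c hc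
  simp only [Bool.not_eq_true', Bool.and_eq_false_iff, Bool.or_eq_false_iff,
    beq_eq_false_iff_ne, bne_eq_false_iff_eq] at hw
  rcases hw with (h3 | h3) | h3
  · exfalso; rcases hab' with h1 | h1 <;> omega
  · exfalso; rcases hac' with h2 | h2 <;> omega
  · exact h3

-- ===== VERDICT (by name: the statement is the Claim_ definition above) =====
theorem corrigir_palavra_spec : Claim_equal_corrigir_palavra := by
  intro new _ hPre
  unfold Spec_corrigir_palavra corrigir_palavra corrigir_palavra_alt
  set l := new.toList with hl
  have hS : pvUniq l := pvUniqB_to_pvUniq l hPre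
  obtain ⟨hcnt, hred⟩ := core_red l hS (l.length + 1) l (by omega) (fun x hx => hx)
  set F := corrigir_palavra_core (l.length + 1) l with hF
  have hch := cntB_zero_chain F hcnt
  have hpf : List.foldl pvStackStep [] F = F.reverse := by
    have := pf_red F [] hch (by cases F <;> trivial)
    simpa using this
  have : F.reverse = List.foldl pvStackStep [] l := by rw [← hpf, hred]
  have hFe : F = (List.foldl pvStackStep [] l).reverse := by
    rw [← this, List.reverse_reverse]
  rw [hFe]
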